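-- pv_equiv track=rewrite | github.com/harjitmoe/mdplay | mdplay/harbnf.py | read_prog
-- ===== SOURCE A (Python) =====
-- class ParsingOfBnfError(Exception): pass
--
-- def read_prog(file, flags=frozenset()):
--     out = []
--     condstack = []
--     for line in file:
--         in_business = True
--         for instr, argument in condstack:
--             if instr in ("ifdef", "else_of_ifndef"):
--                 if argument not in flags:
--                     in_business = False
--                     break
--             elif instr in ("ifndef", "else_of_ifdef"):
--                 if argument in flags:
--                     in_business = False
--                     break
--             else:
--                 raise AssertionError(f"invalid directive: {instr!r}")
--         #
--         if line.startswith("%:"):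
--             rr = line[2:].strip().split(None, 1)
--             if len(rr) == 2:
--                 rule, rest = rr
--             else:
--                 rule, = rr
--                 rest = ""
--             rule = rule.casefold()
--             if rule == "ifdef":
--                 condstack.append(("ifdef", rest))
--             elif rule == "ifndef":
--                 condstack.append(("ifndef", rest))
--             elif rule == "else":
--                 if rest:
--                     raise ParsingOfBnfError("%:else does not take arguments")
--                 if not condstack:
--                     raise ParsingOfBnfError("%:else outside a conditional")
--                 outerrule, outerarg = condstack.pop()
--                 if outerrule == "ifdef":
--                     condstack.append(("else_of_ifdef", outerarg))
--                 elif outerrule == "ifndef":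
--                     condstack.append(("else_of_ifndef", outerarg))
--                 elif outerrule.startswith("else_"):
--                     raise ParsingOfBnfError("multiple %:else within a single conditional")
--                 else:
--                     raise AssertionError(f"invalid directive: {outerrule!r}")
--             elif rule == "endif":
--                 if not condstack:
--                     raise ParsingOfBnfError("%:endif outside a conditional")
--                 condstack.pop()
--             else:
--                 raise ParsingOfBnfError(f"unrecognised directive: {rule!r}")
--         elif in_business:
--             out.append(line)
--     return "".join(out)
-- ===== SOURCE B (Python) =====
-- class ParsingOfBnfError(Exception): pass
--
-- def read_prog(file, flags=frozenset()):
--     # Keep only (is_else, blocks) booleans on the stack plus a running count of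
--     # blocking entries, instead of rescanning the stack against flags per line.
--     out = []
--     stack = []      # entries (is_else, blocks)
--     blocked = 0     # number of entries with blocks == True
--     for line in file:
--         if line.startswith("%:"):
--             parts = line[2:].strip().split(None, 1)
--             rule = parts[0].casefold()
--             rest = parts[1] if len(parts) == 2 else ""
--             if rule == "ifdef" or rule == "ifndef":
--                 b = (rest not in flags) if rule == "ifdef" else (rest in flags)
--                 stack.append((False, b))
--                 blocked += b
--             elif rule == "else":
--                 if rest:
--                     raise ParsingOfBnfError("%:else does not take arguments")
--                 if not stack:
--                     raise ParsingOfBnfError("%:else outside a conditional")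
--                 is_else, b = stack.pop()
--                 if is_else:
--                     raise ParsingOfBnfError("multiple %:else within a single conditional")
--                 blocked += (not b) - b
--                 stack.append((True, not b))
--             elif rule == "endif":
--                 if not stack:
--                     raise ParsingOfBnfError("%:endif outside a conditional")
--                 blocked -= stack.pop()[1]
--             else:
--                 raise ParsingOfBnfError(f"unrecognised directive: {rule!r}")
--         elif not blocked:
--             out.append(line)
--     return "".join(out)
-- ===== Notes on version B (the rewrite author's own statement) =====
-- stated objective: alternative
-- what changed: B keeps only (is_else, blocks) booleans on the conditional stack plus a running count of blocking entries, so the per-line activity test reads one counter instead of rescanning the whole condstack against flags.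
import Mathlib
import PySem

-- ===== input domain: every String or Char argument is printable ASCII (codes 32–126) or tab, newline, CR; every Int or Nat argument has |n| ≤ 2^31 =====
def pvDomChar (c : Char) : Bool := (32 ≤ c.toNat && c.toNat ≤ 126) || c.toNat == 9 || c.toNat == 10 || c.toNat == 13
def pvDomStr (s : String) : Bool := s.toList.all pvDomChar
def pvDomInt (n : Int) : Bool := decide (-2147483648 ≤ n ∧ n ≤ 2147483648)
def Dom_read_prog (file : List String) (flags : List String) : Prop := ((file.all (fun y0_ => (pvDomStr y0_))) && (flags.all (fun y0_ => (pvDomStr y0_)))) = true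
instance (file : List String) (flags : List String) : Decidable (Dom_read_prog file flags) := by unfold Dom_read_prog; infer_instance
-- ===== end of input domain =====

-- B replaces A's per-line rescan of the whole condstack with a boolean stack and
-- a running count of blocking conditionals.  casefold is ported as lower (equal
-- on the ASCII domain).

-- ===== PORT A =====
-- A's inner 'for instr, argument in condstack' loop with its break: scans
-- front-to-back, stops at the first blocking entry; none = the AssertionError
-- branch for an invalid directive tag (unreachable from the empty stack).
def pvScanA (flags : List String) : List (String × String) → Option Bool
  | [] => some true
  | (instr, argument) :: rest =>
    if instr == "ifdef" || instr == "else_of_ifndef" then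
      if !(flags.contains argument) then some false else pvScanA flags rest
    else if instr == "ifndef" || instr == "else_of_ifdef" then
      if flags.contains argument then some false else pvScanA flags rest
    else none

-- the directive dispatch of A ('%:' lines); none = a raise in the Python
def pvDirA (rule rest : String) (out : List String)
    (condstack : List (String × String)) :
    Option (List String × List (String × String)) :=
  if rule == "ifdef" then some (out, condstack ++ [("ifdef", rest)])
  else if rule == "ifndef" then some (out, condstack ++ [("ifndef", rest)])
  else if rule == "else" then
    if rest != "" then none
    else
      match condstack.getLast? with
      | none => none
      | some (outerrule, outerarg) =>
        if outerrule == "ifdef" then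
          some (out, condstack.dropLast ++ [("else_of_ifdef", outerarg)])
        else if outerrule == "ifndef" then
          some (out, condstack.dropLast ++ [("else_of_ifndef", outerarg)])
        else none
  else if rule == "endif" then
    match condstack.getLast? with
    | none => none
    | some _ => some (out, condstack.dropLast)
  else none

-- one iteration of A's outer loop
def pvStepA (flags : List String) (st : List String × List (String × String))
    (line : String) : Option (List String × List (String × String)) :=
  match pvScanA flags st.2 with
  | none => none
  | some in_business =>
    if PySem.Str.startswith line "%:" then
      match PySem.Str.split₀Max (PySem.Str.strip (PySem.Str.slice line (some 2) none)) 1 with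
      | [rule0, rest] => pvDirA (PySem.Str.lower rule0) rest st.1 st.2
      | [rule0] => pvDirA (PySem.Str.lower rule0) "" st.1 st.2
      | _ => none
    else if in_business then some (st.1 ++ [line], st.2) else some (st.1, st.2)

def read_prog (file : List String) (flags : List String) : String :=
  match file.foldl (fun st? line => st?.bind (fun st => pvStepA flags st line))
      (some ([], [])) with
  | some (out, _) => PySem.Str.join "" out
  | none => ""  -- the Python raises here; these inputs are outside Pre_

-- ===== PORT B =====
-- B's directive dispatch ('%:' lines) on the boolean stack + running count
def pvDirB (flags : List String) (rule rest : String) (out : List String)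
    (stack : List (Bool × Bool)) (blocked : Int) :
    Option (List String × List (Bool × Bool) × Int) :=
  if rule == "ifdef" || rule == "ifndef" then
    let b := if rule == "ifdef" then !(flags.contains rest) else flags.contains rest
    some (out, stack ++ [(false, b)], blocked + (if b then 1 else 0))
  else if rule == "else" then
    if rest != "" then none
    else
      match stack.getLast? with
      | none => none
      | some (isElse, b) =>
        if isElse then none
        else some (out, stack.dropLast ++ [(true, !b)],
                   blocked + (if !b then 1 else 0) - (if b then 1 else 0))
  else if rule == "endif" then
    match stack.getLast? with
    | none => none
    | some (_, b) => some (out, stack.dropLast, blocked - (if b then 1 else 0))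
  else none

-- one iteration of B's loop: state (out, stack of (is_else, blocks), blocked)
def pvStepB (flags : List String)
    (st : List String × List (Bool × Bool) × Int) (line : String) :
    Option (List String × List (Bool × Bool) × Int) :=
  if PySem.Str.startswith line "%:" then
    match PySem.Str.split₀Max (PySem.Str.strip (PySem.Str.slice line (some 2) none)) 1 with
    | [rule0, rest] => pvDirB flags (PySem.Str.lower rule0) rest st.1 st.2.1 st.2.2
    | [rule0] => pvDirB flags (PySem.Str.lower rule0) "" st.1 st.2.1 st.2.2
    | _ => none
  else if st.2.2 == 0 then some (st.1 ++ [line], st.2.1, st.2.2)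
  else some (st.1, st.2.1, st.2.2)

def read_prog_alt (file : List String) (flags : List String) : String :=
  match file.foldl (fun st? line => st?.bind (fun st => pvStepB flags st line))
      (some ([], [], 0)) with
  | some (out, _, _) => PySem.Str.join "" out
  | none => ""  -- the Python raises here; these inputs are outside Pre_

-- ===== PRECONDITION & SPEC =====
-- Pre_ excludes exactly the inputs on which the Python A raises
-- (ParsingOfBnfError, or ValueError on a bare '%:' line): a purely syntactic
-- scan of the '%:' directive lines — tracking only whether each open
-- conditional has seen its %:else — independent of flags and of the output.
def pvOkLine (line : String) (st : List Bool) : Option (List Bool) :=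
  if PySem.Str.startswith line "%:" then
    match PySem.Str.split₀Max (PySem.Str.strip (PySem.Str.slice line (some 2) none)) 1 with
    | [] => none
    | rule0 :: restl =>
      let rule := PySem.Str.lower rule0
      let rest := match restl with | [r] => r | _ => ""
      if rule == "ifdef" || rule == "ifndef" then some (st ++ [false])
      else if rule == "else" then
        if rest != "" then none
        else
          match st.getLast? with
          | none => none
          | some isElse => if isElse then none else some (st.dropLast ++ [true])
      else if rule == "endif" then
        match st.getLast? with
        | none => none
        | some _ => some st.dropLast
      else none
  else some st

def Pre_read_prog (file : List String) (flags : List String) : Prop :=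
  (file.foldl (fun st? line => st?.bind (pvOkLine line)) (some [])).isSome = true

instance (file : List String) (flags : List String) : Decidable (Pre_read_prog file flags) := by
  unfold Pre_read_prog; infer_instance

def pvWitness_read_prog : List String × List String :=
  (["%:ifdef FOO\n", "a\n", "%:else\n", "b\n", "%:endif\n", "c\n"], ["FOO"])

def Spec_read_prog (file : List String) (flags : List String) (out : String) : Prop := out = read_prog_alt file flags
instance (file : List String) (flags : List String) (out : String) : Decidable (Spec_read_prog file flags out) := by unfold Spec_read_prog; infer_instance

-- ===== CLAIM (what is proved, stated in full; the proofs are below) =====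
def Claim_equal_read_prog : Prop := ∀ (file : List String) (flags : List String), Dom_read_prog file flags → Pre_read_prog file flags → Spec_read_prog file flags (read_prog file flags)

-- ===== LEMMAS AND PROOFS =====

-- abstraction: what B's (is_else, blocks) entry is for an A condstack entry
def pvAbs (flags : List String) (e : String × String) : Bool × Bool :=
  (e.1 == "else_of_ifdef" || e.1 == "else_of_ifndef",
   if e.1 == "ifdef" then !(flags.contains e.2)
   else if e.1 == "ifndef" then flags.contains e.2
   else if e.1 == "else_of_ifdef" then flags.contains e.2
   else !(flags.contains e.2))

-- every tag A ever pushes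
def pvValid (cs : List (String × String)) : Prop :=
  ∀ e ∈ cs, e.1 = "ifdef" ∨ e.1 = "ifndef" ∨ e.1 = "else_of_ifdef" ∨ e.1 = "else_of_ifndef"

def pvCnt (flags : List String) (cs : List (String × String)) : Int :=
  ((cs.map (pvAbs flags)).countP (·.2) : Nat)

-- A's rescan, on a valid stack, answers "no entry blocks"
theorem pvScanA_eq (flags : List String) (cs : List (String × String))
    (hV : pvValid cs) :
    pvScanA flags cs = some (!(cs.map (pvAbs flags)).any (·.2)) := by
  induction cs with
  | nil => rfl
  | cons e t ih =>
    obtain ⟨i, a⟩ := e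
    have hi := hV (i, a) (List.mem_cons_self)
    have ht : pvValid t := fun x hx => hV x (List.mem_cons_of_mem _ hx)
    simp only at hi
    rcases hi with h | h | h | h <;> subst h <;>
      by_cases hc : a ∈ flags <;>
      simp [pvScanA, pvAbs, hc, ih ht]

theorem pvCnt_eq_zero_iff (flags : List String) (cs : List (String × String)) :
    (pvCnt flags cs == 0) = !(cs.map (pvAbs flags)).any (·.2) := by
  unfold pvCnt
  rcases h : (cs.map (pvAbs flags)).any (·.2) with _ | _
  · have h0 : (cs.map (pvAbs flags)).countP (·.2) = 0 := by
      rw [List.countP_eq_zero]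
      intro x hx
      have := List.any_eq_false.mp h x hx
      simpa using this
    simp [h0]
  · obtain ⟨x, hx, hb⟩ := List.any_eq_true.mp h
    have h0 : (cs.map (pvAbs flags)).countP (·.2) ≠ 0 := by
      rw [Ne, List.countP_eq_zero]
      intro hall
      exact absurd (by simpa using hb) (by simpa using hall x hx)
    rw [show (!true) = false from rfl]
    simp only [beq_eq_false_iff_ne, Ne, Int.natCast_eq_zero]
    exact h0

-- the abstraction map on states
def pvF (flags : List String) (st : List String × List (String × String)) :
    List String × List (Bool × Bool) × Int :=
  (st.1, st.2.map (pvAbs flags), pvCnt flags st.2)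

theorem pvCnt_append (flags : List String) (cs : List (String × String)) (e : String × String) :
    pvCnt flags (cs ++ [e]) = pvCnt flags cs + (if (pvAbs flags e).2 then 1 else 0) := by
  unfold pvCnt
  rw [List.map_append]
  simp only [List.countP_append, List.map_cons, List.map_nil, List.countP_cons,
    List.countP_nil]
  split <;> push_cast <;> omega

theorem pvCnt_getLast (flags : List String) (cs : List (String × String)) (e : String × String)
    (h : cs.getLast? = some e) :
    pvCnt flags cs = pvCnt flags cs.dropLast + (if (pvAbs flags e).2 then 1 else 0) := by
  conv_lhs => rw [← List.dropLast_concat_getLast (l := cs) (by rintro rfl; simp at h)]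
  rw [List.getLast?_eq_some_iff] at h
  obtain ⟨t, rfl⟩ := h
  rw [pvCnt_append]
  simp

theorem pvValid_dropLast (cs : List (String × String)) (hV : pvValid cs) :
    pvValid cs.dropLast :=
  fun e he => hV e (List.Sublist.mem he (List.dropLast_sublist cs))

-- the directive dispatch: B's is the image of A's under the abstraction
theorem pvDir_sim (flags : List String) (rule rest : String) (out : List String)
    (cs : List (String × String)) (hV : pvValid cs) :
    pvDirB flags rule rest out (cs.map (pvAbs flags)) (pvCnt flags cs)
      = (pvDirA rule rest out cs).map (pvF flags)
    ∧ ∀ st, pvDirA rule rest out cs = some st → pvValid st.2 := by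
  have hvpush : ∀ (i a : String), (i = "ifdef" ∨ i = "ifndef" ∨ i = "else_of_ifdef" ∨ i = "else_of_ifndef") →
      pvValid (cs.dropLast ++ [(i, a)]) := by
    intro i a hi e he
    rcases List.mem_append.mp he with h | h
    · exact pvValid_dropLast cs hV e h
    · simp at h; subst h; simpa using hi
  have hvpush2 : ∀ (i a : String), (i = "ifdef" ∨ i = "ifndef" ∨ i = "else_of_ifdef" ∨ i = "else_of_ifndef") →
      pvValid (cs ++ [(i, a)]) := by
    intro i a hi e he
    rcases List.mem_append.mp he with h | h
    · exact hV e h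
    · simp at h; subst h; simpa using hi
  unfold pvDirA pvDirB
  by_cases h1 : rule = "ifdef"
  · subst h1
    refine ⟨?_, ?_⟩
    · simp [pvF, pvCnt_append, pvAbs]
    · intro st hst; simp at hst; subst hst; exact hvpush2 _ _ (by simp)
  by_cases h2 : rule = "ifndef"
  · subst h2
    refine ⟨?_, ?_⟩
    · simp [pvF, pvCnt_append, pvAbs]
    · intro st hst; simp at hst; subst hst; exact hvpush2 _ _ (by simp)
  by_cases h3 : rule = "else"
  · subst h3
    simp only [show ("else" == "ifdef") = false from rfl,
      show ("else" == "ifndef") = false from rfl,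
      show ("else" == "else") = true from rfl, Bool.false_eq_true, if_false, if_true]
    by_cases hr : rest = ""
    · simp only [hr, bne_self_eq_false, Bool.false_eq_true, if_false]
      rcases hl : cs.getLast? with _ | ⟨i, a⟩
      · rw [List.getLast?_map, hl]; simp
      · rw [List.getLast?_map, hl]
        have hi := hV (i, a) (List.mem_of_getLast? hl)
        simp only at hi
        have hcnt := pvCnt_getLast flags cs (i, a) hl
        have hdrop : (cs.map (pvAbs flags)).dropLast = cs.dropLast.map (pvAbs flags) :=
          List.map_dropLast.symm
        rcases hi with h | h | h | h <;> subst h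
        · have habs : pvAbs flags ("ifdef", a) = (false, !flags.contains a) := by
            simp [pvAbs]
          have habs2 : pvAbs flags ("else_of_ifdef", a) = (true, flags.contains a) := by
            simp [pvAbs]
          rw [habs] at hcnt
          refine ⟨?_, ?_⟩
          · simp only [Option.map_some, habs, hdrop, Bool.not_not, hcnt]
            rcases hc : flags.contains a with _ | _ <;>
              simp [pvF, pvCnt_append, habs2] <;>
              first
              | omega
              | simpa using hc
          · intro st hst; simp at hst; subst hst; exact hvpush _ _ (by simp)
        · have habs : pvAbs flags ("ifndef", a) = (false, flags.contains a) := by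
            simp [pvAbs]
          have habs2 : pvAbs flags ("else_of_ifndef", a) = (true, !flags.contains a) := by
            simp [pvAbs]
          rw [habs] at hcnt
          refine ⟨?_, ?_⟩
          · simp only [Option.map_some, habs, hdrop, hcnt]
            rcases hc : flags.contains a with _ | _ <;>
              simp [pvF, pvCnt_append, habs2] <;>
              first
              | omega
              | simpa using hc
          · intro st hst; simp at hst; subst hst; exact hvpush _ _ (by simp)
        · have habs : pvAbs flags ("else_of_ifdef", a) = (true, flags.contains a) := by
            simp [pvAbs]
          refine ⟨by simp [habs], ?_⟩
          intro st hst; simp at hst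
        · have habs : pvAbs flags ("else_of_ifndef", a) = (true, !flags.contains a) := by
            simp [pvAbs]
          refine ⟨by simp [habs], ?_⟩
          intro st hst; simp at hst
    · simp [hr]
  by_cases h4 : rule = "endif"
  · subst h4
    simp only [show (("endif" == "ifdef") || ("endif" == "ifndef")) = false from rfl,
      Bool.false_eq_true, if_false, beq_self_eq_true, if_true,
      show ("endif" == "else") = false from rfl]
    rcases hl : cs.getLast? with _ | ⟨i, a⟩
    · rw [List.getLast?_map, hl]; simp
    · rw [List.getLast?_map, hl]
      refine ⟨?_, ?_⟩
      · simp [pvF, pvCnt_getLast flags cs (i, a) hl, List.map_dropLast]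
        try omega
      · intro st hst; simp at hst; subst hst
        exact pvValid_dropLast cs hV
  · have : (rule == "ifdef" || rule == "ifndef") = false := by simp [h1, h2]
    simp [this, h1, h2, h3, h4]

-- none propagates through the rest of either fold
theorem pvFold_none {β : Type} (step : β → String → Option β) (t : List String) :
    t.foldl (fun st? line => st?.bind (fun st => step st line)) none = none := by
  induction t with
  | nil => rfl
  | cons _ _ ih => simpa using ih

-- one line: B's step is the image of A's step under the abstraction
theorem pvStep_sim (flags : List String) (line : String) (out : List String)
    (cs : List (String × String)) (hV : pvValid cs) :
    pvStepB flags (pvF flags (out, cs)) line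
      = (pvStepA flags (out, cs) line).map (pvF flags)
    ∧ ∀ st, pvStepA flags (out, cs) line = some st → pvValid st.2 := by
  have hscan := pvScanA_eq flags cs hV
  unfold pvStepA pvStepB
  rw [hscan]
  dsimp only [pvF]
  by_cases hs : PySem.Str.startswith line "%:"
  · rw [if_pos hs, if_pos hs]
    rcases hsp : PySem.Str.split₀Max (PySem.Str.strip (PySem.Str.slice line (some 2) none)) 1 with
      _ | ⟨r0, _ | ⟨r1, _ | _⟩⟩
    · simp
    · exact pvDir_sim flags (PySem.Str.lower r0) "" out cs hV
    · exact pvDir_sim flags (PySem.Str.lower r0) r1 out cs hV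
    · simp
  · rw [if_neg hs, if_neg hs]
    constructor
    · simp only [pvCnt_eq_zero_iff]
      rcases hb : (cs.map (pvAbs flags)).any (·.2) with _ | _ <;>
        simp [pvF]
    · intro st hst
      rcases hb : (cs.map (pvAbs flags)).any (·.2) with _ | _ <;>
        rw [hb] at hst <;> simp at hst <;> subst hst <;> exact hV

-- whole run
theorem pvFold_sim (flags : List String) (file : List String)
    (out : List String) (cs : List (String × String)) (hV : pvValid cs) :
    file.foldl (fun st? line => st?.bind (fun st => pvStepB flags st line))
        (some (pvF flags (out, cs)))
      = (file.foldl (fun st? line => st?.bind (fun st => pvStepA flags st line))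
          (some (out, cs))).map (pvF flags) := by
  induction file generalizing out cs with
  | nil => rfl
  | cons l t ih =>
    simp only [List.foldl_cons, Option.bind_some]
    obtain ⟨hstep, hval⟩ := pvStep_sim flags l out cs hV
    rw [hstep]
    rcases ha : pvStepA flags (out, cs) l with _ | ⟨o, c⟩
    · simp only [Option.map_none]
      rw [pvFold_none, pvFold_none]
      rfl
    · simp only [Option.map_some]
      exact ih o c (hval (o, c) ha)

-- ===== VERDICT (by name: the statement is the Claim_ definition above) =====
theorem read_prog_spec : Claim_equal_read_prog := by
  intro file flags _ _
  unfold Spec_read_prog read_prog read_prog_alt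
  have h := pvFold_sim flags file [] [] (fun e he => by cases he)
  have h0 : pvF flags (([] : List String), ([] : List (String × String)))
      = ([], [], 0) := rfl
  rw [h0] at h
  rw [h]
  rcases ha : file.foldl (fun st? line => st?.bind (fun st => pvStepA flags st line))
      (some ([], [])) with _ | ⟨o, c⟩
  · rw [ha]; rfl
  · rw [ha]; rfl
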